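-- pv_equiv track=rewrite | github.com/tlucanti/contest | Yandex/YandexCup/2024/algo/Quals/A.py | solve
-- ===== SOURCE A (Python) =====
-- import math
--
-- def log(*args):
--     pass
--
-- def lcm(a, b):
--     return a * b // math.gcd(a, b)
--
-- def nr_div(n, a, b, c):
--     ab = lcm(a, b)
--     ac = lcm(a, c)
--     bc = lcm(b, c)
--     abc = lcm(lcm(a, b), c)
--
--     return n // ab + n // ac + n // bc - 3 * (n // abc)
--
-- def solve(n, a, b, c):
--     low = 1
--     high = n * lcm(lcm(a, b), c)
--     log('high', high)
--
--     while high - low > 1: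
--         mid = (low + high) // 2
--         nr = nr_div(mid, a, b, c)
--         if nr == n:
--             log('ok', mid)
--             high = mid
--             break
--         elif nr < n:
--             log('low', nr)
--             low = mid
--         else:
--             log('high', nr)
--             high = mid
--
--     while nr_div(high, a, b, c) == n:
--         log('check', mid)
--         high -= 1
--     return high + 1
-- ===== SOURCE B (Python) =====
-- import math
--
--
-- def solve(n, a, b, c):
--     # nr(x) = how many y in [1, x] are divisible by exactly two of a, b, c;
--     # it is nondecreasing and grows in steps of at most 1, so the answer
--     # (the smallest x with nr(x) == n) is the lower bound of nr(x) >= n,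
--     # found by a single half-open binary search -- no linear backstep.
--     def l(x, y):
--         return x * y // math.gcd(x, y)
--
--     ab, ac, bc = l(a, b), l(a, c), l(b, c)
--     abc = l(l(a, b), c)
--
--     def nr(x):
--         return x // ab + x // ac + x // bc - 3 * (x // abc)
--
--     lo, hi = 1, n * abc + 1
--     while lo < hi:
--         mid = (lo + hi) // 2
--         if nr(mid) >= n:
--             hi = mid
--         else:
--             lo = mid + 1
--     return hi
-- ===== Notes on version B (the rewrite author's own statement) =====
-- stated objective: faster
-- what changed: A binary-searches for any x with count==n, breaks on equality, and then walks DOWN one step at a time through the whole block of x's with equal count (linear in the block length, which can be enormous); B is a single half-open lower-bound binary search for the first x with count>=n, with no equality break and no linear backstep.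
-- intended difference: For n=1 when exactly two of a,b,c are 1 and the third is >=3, nr(1) already equals 1 so A's binary-search invariant nr(low)<n is broken and A returns 3, while B returns 1, the smallest x with count n, which is what the search is for. — e.g. on solve(1, 1, 1, 3): A returns 3, B returns 1
-- outside the precondition, e.g. on solve(5, -2, 3, -4): A returns 61, B returns 61; on solve(-7, -5, -1, -2): A returns 3, B returns 1
import Mathlib
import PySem

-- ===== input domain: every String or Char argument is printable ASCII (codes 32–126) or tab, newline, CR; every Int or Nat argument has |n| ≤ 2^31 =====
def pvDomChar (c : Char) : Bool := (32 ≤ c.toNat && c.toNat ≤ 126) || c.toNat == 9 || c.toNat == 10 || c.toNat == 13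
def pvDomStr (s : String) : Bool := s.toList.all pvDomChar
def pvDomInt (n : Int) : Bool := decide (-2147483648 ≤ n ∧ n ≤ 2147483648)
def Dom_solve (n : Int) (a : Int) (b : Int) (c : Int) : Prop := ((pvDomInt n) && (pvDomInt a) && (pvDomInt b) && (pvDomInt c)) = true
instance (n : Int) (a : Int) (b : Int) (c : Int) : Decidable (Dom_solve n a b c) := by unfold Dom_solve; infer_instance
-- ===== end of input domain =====

-- B replaces A's equality-break binary search plus linear backstep (linear in the block
-- of x's with equal count) by a single half-open lower-bound binary search.
-- The equivalence is about the RETURN value; neither program mutates anything.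

-- ===== PORT A =====
-- lcm(a, b) = a * b // math.gcd(a, b)  (both Pythons contain this same helper)
def pyLcm (a : Int) (b : Int) : Int := PySem.Int.floordiv (a * b) (Int.gcd a b)

-- nr_div(n, a, b, c): recomputes the four lcms on every call, as A does
def nrDiv (x : Int) (a : Int) (b : Int) (c : Int) : Int :=
  PySem.Int.floordiv x (pyLcm a b) + PySem.Int.floordiv x (pyLcm a c)
    + PySem.Int.floordiv x (pyLcm b c) - 3 * PySem.Int.floordiv x (pyLcm (pyLcm a b) c)

-- 'while nr_div(high) == n: high -= 1; return high + 1'; fuel makes the descent total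
-- (inside Pre_ the loop provably stops at 0 at the latest, so the fuel below suffices;
-- where Python would loop forever or raise, the input is outside Pre_)
def solveBack (n : Int) (a : Int) (b : Int) (c : Int) (high : Int) (fuel : Nat) : Int :=
  if nrDiv high a b c = n then
    match fuel with
    | 0 => high
    | f + 1 => solveBack n a b c (high - 1) f
  else high + 1

-- 'while high - low > 1: …' with the equality break going straight to the backstep;
-- the Nat fuel only bounds the iteration count (each pass shrinks high - low, so the
-- fuel passed by 'solve' below is provably never exhausted)
def solveLoop (n : Int) (a : Int) (b : Int) (c : Int) (low : Int) (high : Int) (fuel : Nat) : Int :=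
  if high - low > 1 then
    match fuel with
    | 0 => solveBack n a b c high (high.toNat + 1)
    | f + 1 =>
      let mid := PySem.Int.floordiv (low + high) 2
      let nr := nrDiv mid a b c
      if nr = n then solveBack n a b c mid (mid.toNat + 1)
      else if nr < n then solveLoop n a b c mid high f
      else solveLoop n a b c low mid f
  else solveBack n a b c high (high.toNat + 1)

def solve (n : Int) (a : Int) (b : Int) (c : Int) : Int :=
  solveLoop n a b c 1 (n * pyLcm (pyLcm a b) c) (n * pyLcm (pyLcm a b) c - 1).toNat

-- ===== PORT B =====
-- B's local nr(x) over the four precomputed lcms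
def nrB (ab : Int) (ac : Int) (bc : Int) (abc : Int) (x : Int) : Int :=
  PySem.Int.floordiv x ab + PySem.Int.floordiv x ac
    + PySem.Int.floordiv x bc - 3 * PySem.Int.floordiv x abc

-- 'while lo < hi: mid = (lo+hi)//2; if nr(mid) >= n: hi = mid else: lo = mid+1; return hi'
-- (fuel as above: each pass shrinks hi - lo, so the fuel passed below never runs out)
def altLoop (n : Int) (ab : Int) (ac : Int) (bc : Int) (abc : Int) (lo : Int) (hi : Int) (fuel : Nat) : Int :=
  if lo < hi then
    match fuel with
    | 0 => hi
    | f + 1 =>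
      let mid := PySem.Int.floordiv (lo + hi) 2
      if n ≤ nrB ab ac bc abc mid then altLoop n ab ac bc abc lo mid f
      else altLoop n ab ac bc abc (mid + 1) hi f
  else hi

def solve_alt (n : Int) (a : Int) (b : Int) (c : Int) : Int :=
  let ab := pyLcm a b
  let ac := pyLcm a c
  let bc := pyLcm b c
  let abc := pyLcm (pyLcm a b) c
  altLoop n ab ac bc abc 1 (n * abc + 1) (n * abc).toNat

-- ===== PRECONDITION & SPEC =====
-- Pre_ admits (i) the task's natural domain n, a, b, c ≥ 1 minus the three inputs
-- (1, {1,1,2}) on which A raises UnboundLocalError, and (ii) every input on which the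
-- search loop never runs (n * lcm ≤ 0) and A returns n * lcm + 1 without raising
-- (lcm ≠ 0 and nr_div(n * lcm) ≠ n, else Python raises ZeroDivision-/UnboundLocalError).
-- Still excluded although A returns there: inputs with a negative parameter on which the
-- binary search really runs over floor divisions by negative lcms — values no caller of
-- this contest function would specify (see the claim's cites).
def Pre_solve (n : Int) (a : Int) (b : Int) (c : Int) : Prop :=
  (1 ≤ n ∧ 1 ≤ a ∧ 1 ≤ b ∧ 1 ≤ c ∧ ¬(n = 1 ∧ a * b * c = 2)) ∨
    (pyLcm (pyLcm a b) c ≠ 0 ∧ n * pyLcm (pyLcm a b) c ≤ 0 ∧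
      nrDiv (n * pyLcm (pyLcm a b) c) a b c ≠ n)
instance (n : Int) (a : Int) (b : Int) (c : Int) : Decidable (Pre_solve n a b c) := by
  unfold Pre_solve; infer_instance
def pvWitness_solve : Int × Int × Int × Int := (6, 2, 3, 5)

-- For n=1 with exactly two of a,b,c equal to 1 and the third ≥ 3, nr(1) already equals 1,
-- A's invariant nr(low) < n is broken and A returns 3, while B returns 1, the smallest x
-- whose count is n — the value the search is for.
def D_solve (n : Int) (a : Int) (b : Int) (c : Int) : Prop :=
  n = 1 ∧ ((a = 1 ∧ b = 1 ∧ 3 ≤ c) ∨ (a = 1 ∧ c = 1 ∧ 3 ≤ b) ∨ (b = 1 ∧ c = 1 ∧ 3 ≤ a))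
instance (n : Int) (a : Int) (b : Int) (c : Int) : Decidable (D_solve n a b c) := by
  unfold D_solve; infer_instance

def Spec_solve (n : Int) (a : Int) (b : Int) (c : Int) (out : Int) : Prop :=
  ¬ D_solve n a b c → out = solve_alt n a b c
instance (n : Int) (a : Int) (b : Int) (c : Int) (out : Int) : Decidable (Spec_solve n a b c out) := by
  unfold Spec_solve; infer_instance

def pvDiffWitness_solve : Int × Int × Int × Int := (1, 1, 1, 3)
def pvDiffWitnessOut_solve : Int × Int := (3, 1)

-- ===== CLAIM (what is proved, stated in full; the proofs are below) =====
def Claim_unchanged_solve : Prop := ∀ (n : Int) (a : Int) (b : Int) (c : Int),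
  Dom_solve n a b c → Pre_solve n a b c → Spec_solve n a b c (solve n a b c)
def Claim_changed_solve : Prop :=
  Dom_solve (pvDiffWitness_solve.1) (pvDiffWitness_solve.2.1) (pvDiffWitness_solve.2.2.1) (pvDiffWitness_solve.2.2.2) ∧
  Pre_solve (pvDiffWitness_solve.1) (pvDiffWitness_solve.2.1) (pvDiffWitness_solve.2.2.1) (pvDiffWitness_solve.2.2.2) ∧
  D_solve (pvDiffWitness_solve.1) (pvDiffWitness_solve.2.1) (pvDiffWitness_solve.2.2.1) (pvDiffWitness_solve.2.2.2) ∧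
  solve (pvDiffWitness_solve.1) (pvDiffWitness_solve.2.1) (pvDiffWitness_solve.2.2.1) (pvDiffWitness_solve.2.2.2) = pvDiffWitnessOut_solve.1 ∧
  solve_alt (pvDiffWitness_solve.1) (pvDiffWitness_solve.2.1) (pvDiffWitness_solve.2.2.1) (pvDiffWitness_solve.2.2.2) = pvDiffWitnessOut_solve.2 ∧
  pvDiffWitnessOut_solve.1 ≠ pvDiffWitnessOut_solve.2
def Claim_exact_solve : Prop := ∀ (n : Int) (a : Int) (b : Int) (c : Int),
  Dom_solve n a b c → Pre_solve n a b c → D_solve n a b c → solve n a b c ≠ solve_alt n a b c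

-- ===== LEMMAS AND PROOFS =====

theorem pyLcm_eq (a b : Int) (ha : 0 < a) (hb : 0 < b) : pyLcm a b = (Int.lcm a b : Int) := by
  have hg : 0 < ((Int.gcd a b : Nat) : Int) := by
    exact_mod_cast Int.gcd_pos_of_ne_zero_left b (by omega : a ≠ 0)
  have hml : ((Int.gcd a b : Nat) : Int) * ((Int.lcm a b : Nat) : Int) = a * b := by
    have h2 : ((Int.gcd a b * Int.lcm a b : Nat) : Int) = ((a.natAbs * b.natAbs : Nat) : Int) := by
      rw [Int.gcd_mul_lcm a b]
    push_cast at h2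
    rw [abs_of_pos ha, abs_of_pos hb] at h2
    exact h2
  unfold pyLcm
  rw [PySem.Int.floordiv_eq_ediv_of_pos hg, ← hml, Int.mul_ediv_cancel_left _ (by omega)]

theorem pyLcm_pos (a b : Int) (ha : 0 < a) (hb : 0 < b) : 0 < pyLcm a b := by
  rw [pyLcm_eq a b ha hb]
  have h1 : Int.lcm a b ≠ 0 := by
    intro h
    rcases Int.lcm_eq_zero_iff.mp h with h' | h' <;> omega
  omega

theorem dvd_pyLcm_left (a b : Int) (ha : 0 < a) (hb : 0 < b) : a ∣ pyLcm a b := by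
  rw [pyLcm_eq a b ha hb]; exact Int.dvd_lcm_left a b

theorem dvd_pyLcm_right (a b : Int) (ha : 0 < a) (hb : 0 < b) : b ∣ pyLcm a b := by
  rw [pyLcm_eq a b ha hb]; exact Int.dvd_lcm_right a b

theorem pyLcm_dvd (a b k : Int) (ha : 0 < a) (hb : 0 < b) (h1 : a ∣ k) (h2 : b ∣ k) : pyLcm a b ∣ k := by
  rw [pyLcm_eq a b ha hb, Int.coe_lcm]; exact lcm_dvd h1 h2

theorem fd_bracket (x m : Int) (hm : 0 < m) :
    PySem.Int.floordiv x m * m ≤ x ∧ x < (PySem.Int.floordiv x m + 1) * m :=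
  (PySem.Int.floordiv_eq_iff_of_pos hm).mp rfl

theorem fd_step (x m : Int) (hm : 0 < m) :
    PySem.Int.floordiv x m = PySem.Int.floordiv (x - 1) m + (if m ∣ x then 1 else 0) := by
  obtain ⟨h1, h2⟩ := fd_bracket x m hm
  set q := PySem.Int.floordiv x m with hq
  have hexp : (q + 1) * m = q * m + m := by ring
  split_ifs with hd
  · -- x = q * m exactly
    have hx : x = q * m := by
      obtain ⟨t, ht⟩ := (dvd_sub hd (Dvd.intro_left q rfl) : m ∣ x - q * m)
      have h3 : 0 ≤ m * t := by omega
      have h4 : m * t < m := by omega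
      clear hexp
      have ht0 : t = 0 := by
        rcases lt_trichotomy t 0 with h | h | h
        · nlinarith
        · exact h
        · nlinarith
      subst ht0
      simp at ht
      omega
    have : PySem.Int.floordiv (x - 1) m = q - 1 := by
      rw [PySem.Int.floordiv_eq_iff_of_pos hm]
      constructor <;> nlinarith
    omega
  · have hne : x ≠ q * m := fun h => hd ⟨q, by linarith [h]⟩
    have : PySem.Int.floordiv (x - 1) m = q := by
      rw [PySem.Int.floordiv_eq_iff_of_pos hm]
      constructor <;> nlinarith [h1, h2, lt_of_le_of_ne h1 (Ne.symm (by simpa [mul_comm] using hne))]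
    omega

theorem nr_step (a b c x : Int) (ha : 0 < a) (hb : 0 < b) (hc : 0 < c) :
    nrDiv (x - 1) a b c ≤ nrDiv x a b c ∧ nrDiv x a b c ≤ nrDiv (x - 1) a b c + 1 := by
  have hab : 0 < pyLcm a b := pyLcm_pos a b ha hb
  have hac : 0 < pyLcm a c := pyLcm_pos a c ha hc
  have hbc : 0 < pyLcm b c := pyLcm_pos b c hb hc
  have habc : 0 < pyLcm (pyLcm a b) c := pyLcm_pos _ c hab hc
  have s1 := fd_step x (pyLcm a b) hab
  have s2 := fd_step x (pyLcm a c) hac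
  have s3 := fd_step x (pyLcm b c) hbc
  have s4 := fd_step x (pyLcm (pyLcm a b) c) habc
  -- divisibility structure of the four lcms
  have dab : pyLcm a b ∣ pyLcm (pyLcm a b) c := dvd_pyLcm_left _ c hab hc
  have dac : pyLcm a c ∣ pyLcm (pyLcm a b) c :=
    pyLcm_dvd a c _ ha hc ((dvd_pyLcm_left a b ha hb).trans dab) (dvd_pyLcm_right _ c hab hc)
  have dbc : pyLcm b c ∣ pyLcm (pyLcm a b) c :=
    pyLcm_dvd b c _ hb hc ((dvd_pyLcm_right a b ha hb).trans dab) (dvd_pyLcm_right _ c hab hc)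
  -- any two of the pairwise lcms dividing x forces the full lcm to divide x
  have two1 : pyLcm a b ∣ x → pyLcm a c ∣ x → pyLcm (pyLcm a b) c ∣ x := fun h1 h2 =>
    pyLcm_dvd _ c x hab hc h1 ((dvd_pyLcm_right a c ha hc).trans h2)
  have two2 : pyLcm a b ∣ x → pyLcm b c ∣ x → pyLcm (pyLcm a b) c ∣ x := fun h1 h2 =>
    pyLcm_dvd _ c x hab hc h1 ((dvd_pyLcm_right b c hb hc).trans h2)
  have two3 : pyLcm a c ∣ x → pyLcm b c ∣ x → pyLcm (pyLcm a b) c ∣ x := fun h1 h2 =>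
    pyLcm_dvd _ c x hab hc
      (pyLcm_dvd a b x ha hb ((dvd_pyLcm_left a c ha hc).trans h1) ((dvd_pyLcm_left b c hb hc).trans h2))
      ((dvd_pyLcm_right a c ha hc).trans h1)
  have all3 : pyLcm (pyLcm a b) c ∣ x → (pyLcm a b ∣ x ∧ pyLcm a c ∣ x ∧ pyLcm b c ∣ x) := fun h =>
    ⟨dab.trans h, dac.trans h, dbc.trans h⟩
  unfold nrDiv
  by_cases h1 : pyLcm a b ∣ x <;> by_cases h2 : pyLcm a c ∣ x <;> by_cases h3 : pyLcm b c ∣ x <;>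
    by_cases h4 : pyLcm (pyLcm a b) c ∣ x <;>
    simp [h1, h2, h3, h4] at s1 s2 s3 s4 <;>
    omega

theorem nr_mono (a b c : Int) (ha : 0 < a) (hb : 0 < b) (hc : 0 < c)
    (x y : Int) (hxy : x ≤ y) : nrDiv x a b c ≤ nrDiv y a b c := by
  have key : ∀ k : Nat, nrDiv x a b c ≤ nrDiv (x + k) a b c := by
    intro k
    induction k with
    | zero => simp
    | succ k ih =>
      have := nr_step a b c (x + (k + 1 : Nat)) ha hb hc
      have he : (x + (k + 1 : Nat)) - 1 = x + k := by push_cast; ring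
      rw [he] at this
      omega
  have hk : ∃ k : Nat, y = x + k := ⟨(y - x).toNat, by omega⟩
  obtain ⟨k, rfl⟩ := hk
  exact key k

theorem fd_one (m : Int) (hm : 0 < m) :
    PySem.Int.floordiv 1 m = if m = 1 then 1 else 0 := by
  rw [PySem.Int.floordiv_eq_iff_of_pos hm]
  split_ifs with h
  · subst h; omega
  · constructor <;> omega

theorem eq_one_of_pyLcm_eq_one (a b : Int) (ha : 0 < a) (hb : 0 < b)
    (h : pyLcm a b = 1) : a = 1 ∧ b = 1 := by
  have h1 := dvd_pyLcm_left a b ha hb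
  have h2 := dvd_pyLcm_right a b ha hb
  rw [h] at h1 h2
  exact ⟨Int.eq_one_of_dvd_one (by omega) h1, Int.eq_one_of_dvd_one (by omega) h2⟩

theorem nr_one_lt (n a b c : Int) (hn : 1 ≤ n) (ha : 0 < a) (hb : 0 < b) (hc : 0 < c)
    (hpre : ¬(n = 1 ∧ a * b * c = 2))
    (hD : ¬(n = 1 ∧ ((a = 1 ∧ b = 1 ∧ 3 ≤ c) ∨ (a = 1 ∧ c = 1 ∧ 3 ≤ b) ∨ (b = 1 ∧ c = 1 ∧ 3 ≤ a)))) :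
    nrDiv 1 a b c < n := by
  have hab : 0 < pyLcm a b := pyLcm_pos a b ha hb
  have hac : 0 < pyLcm a c := pyLcm_pos a c ha hc
  have hbc : 0 < pyLcm b c := pyLcm_pos b c hb hc
  have habc : 0 < pyLcm (pyLcm a b) c := pyLcm_pos _ c hab hc
  have one11 : pyLcm 1 1 = (1 : Int) := by decide
  have k1 : pyLcm a b = 1 → a = 1 ∧ b = 1 := eq_one_of_pyLcm_eq_one a b ha hb
  have k2 : pyLcm a c = 1 → a = 1 ∧ c = 1 := eq_one_of_pyLcm_eq_one a c ha hc
  have k3 : pyLcm b c = 1 → b = 1 ∧ c = 1 := eq_one_of_pyLcm_eq_one b c hb hc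
  have kabc : a = 1 → b = 1 → c = 1 → pyLcm (pyLcm a b) c = 1 := by
    intro x y z; subst x; subst y; subst z; rw [one11]; exact one11
  unfold nrDiv
  rw [fd_one _ hab, fd_one _ hac, fd_one _ hbc, fd_one _ habc]
  by_cases h4 : pyLcm (pyLcm a b) c = 1
  · obtain ⟨hab1, hc1⟩ := eq_one_of_pyLcm_eq_one _ c hab hc h4
    obtain ⟨ha1, hb1⟩ := k1 hab1
    subst ha1; subst hb1; subst hc1
    simp [one11]; omega
  by_cases h1 : pyLcm a b = 1
  · obtain ⟨ha1, hb1⟩ := k1 h1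
    have hc1 : c ≠ 1 := fun h => h4 (kabc ha1 hb1 h)
    have h2 : pyLcm a c ≠ 1 := fun h => hc1 (k2 h).2
    have h3 : pyLcm b c ≠ 1 := fun h => hc1 (k3 h).2
    simp [h1, h2, h3]
    rcases eq_or_lt_of_le hn with hn1 | hn2
    · exfalso
      subst ha1; subst hb1
      rcases lt_trichotomy c 2 with h | h | h
      · exact hc1 (by omega)
      · exact hpre ⟨hn1.symm, by omega⟩
      · exact hD ⟨hn1.symm, Or.inl ⟨rfl, rfl, by omega⟩⟩
    · omega
  by_cases h2 : pyLcm a c = 1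
  · obtain ⟨ha1, hc1⟩ := k2 h2
    have hb1 : b ≠ 1 := fun h => h4 (kabc ha1 h hc1)
    have h3 : pyLcm b c ≠ 1 := fun h => hb1 (k3 h).1
    simp [h1, h2, h3, h4]
    rcases eq_or_lt_of_le hn with hn1 | hn2
    · exfalso
      subst ha1; subst hc1
      rcases lt_trichotomy b 2 with h | h | h
      · exact hb1 (by omega)
      · exact hpre ⟨hn1.symm, by omega⟩
      · exact hD ⟨hn1.symm, Or.inr (Or.inl ⟨rfl, rfl, by omega⟩)⟩
    · omega
  by_cases h3 : pyLcm b c = 1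
  · obtain ⟨hb1, hc1⟩ := k3 h3
    have ha1 : a ≠ 1 := fun h => h4 (kabc h hb1 hc1)
    simp [h1, h2, h3]
    rcases eq_or_lt_of_le hn with hn1 | hn2
    · exfalso
      subst hb1; subst hc1
      rcases lt_trichotomy a 2 with h | h | h
      · exact ha1 (by omega)
      · exact hpre ⟨hn1.symm, by omega⟩
      · exact hD ⟨hn1.symm, Or.inr (Or.inr ⟨rfl, rfl, by omega⟩)⟩
    · omega
  · simp [h1, h2, h3, h4]
    omega

theorem mid_bounds (lo hi : Int) (h : lo < hi) :
    lo ≤ PySem.Int.floordiv (lo + hi) 2 ∧ PySem.Int.floordiv (lo + hi) 2 < hi := by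
  have := fd_bracket (lo + hi) 2 (by omega)
  omega

-- the point both searches converge to: first x ≥ 1 with count ≥ n, capped at H + 1
def goodPt (n a b c H h : Int) : Prop :=
  (∀ x : Int, 1 ≤ x → x < h → nrDiv x a b c < n) ∧
    (n ≤ nrDiv h a b c ∨ h = H + 1) ∧ 1 ≤ h ∧ h ≤ H + 1

theorem nrB_eq (a b c x : Int) :
    nrB (pyLcm a b) (pyLcm a c) (pyLcm b c) (pyLcm (pyLcm a b) c) x = nrDiv x a b c := rfl

theorem altLoop_spec (n a b c H : Int) (ha : 0 < a) (hb : 0 < b) (hc : 0 < c) :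
    ∀ (fuel : Nat) (lo hi : Int), (hi - lo).toNat ≤ fuel → 1 ≤ lo → lo ≤ hi → hi ≤ H + 1 →
    (∀ x : Int, 1 ≤ x → x < lo → nrDiv x a b c < n) →
    (n ≤ nrDiv hi a b c ∨ hi = H + 1) →
    goodPt n a b c H (altLoop n (pyLcm a b) (pyLcm a c) (pyLcm b c) (pyLcm (pyLcm a b) c) lo hi fuel) := by
  intro fuel
  induction fuel with
  | zero =>
    intro lo hi hf h1 h2 h3 h4 h5
    have : ¬ lo < hi := by omega
    rw [altLoop, if_neg this]
    exact ⟨fun x hx1 hx2 => h4 x hx1 (by omega), h5, by omega, h3⟩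
  | succ f ih =>
    intro lo hi hf h1 h2 h3 h4 h5
    by_cases hlt : lo < hi
    · rw [altLoop, if_pos hlt]
      simp only [nrB_eq]
      obtain ⟨hm1, hm2⟩ := mid_bounds lo hi hlt
      set mid := PySem.Int.floordiv (lo + hi) 2 with hmid
      by_cases hge : n ≤ nrDiv mid a b c
      · rw [if_pos hge]
        exact ih lo mid (by omega) h1 hm1 (by omega) h4 (Or.inl hge)
      · rw [if_neg hge]
        refine ih (mid + 1) hi (by omega) (by omega) (by omega) h3 ?_ h5
        intro x hx1 hx2
        calc nrDiv x a b c ≤ nrDiv mid a b c := nr_mono a b c ha hb hc x mid (by omega)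
          _ < n := by omega
    · rw [altLoop, if_neg hlt]
      exact ⟨fun x hx1 hx2 => h4 x hx1 (by omega), h5, by omega, h3⟩

theorem solveBack_spec (n a b c : Int) :
    ∀ (fuel : Nat) (h T : Int), T - 1 ≤ h →
    (∀ x : Int, T ≤ x → x ≤ h → nrDiv x a b c = n) →
    nrDiv (T - 1) a b c ≠ n → (h - (T - 1)).toNat ≤ fuel →
    solveBack n a b c h fuel = T := by
  intro fuel
  induction fuel with
  | zero =>
    intro h T h1 h2 h3 h4
    have hh : h = T - 1 := by omega
    subst hh
    rw [solveBack, if_neg h3]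
    ring
  | succ f ih =>
    intro h T h1 h2 h3 h4
    by_cases hh : h = T - 1
    · subst hh
      rw [solveBack, if_neg h3]
      ring
    · have hTh : T ≤ h := by omega
      have hn : nrDiv h a b c = n := h2 h hTh le_rfl
      rw [solveBack, if_pos hn]
      exact ih (h - 1) T (by omega) (fun x hx1 hx2 => h2 x hx1 (by omega)) h3 (by omega)

theorem solveLoop_spec (n a b c H : Int) (ha : 0 < a) (hb : 0 < b) (hc : 0 < c) :
    ∀ (fuel : Nat) (low high h : Int), goodPt n a b c H h →
    (high - low).toNat ≤ fuel → 1 ≤ low → low ≤ high → high ≤ H →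
    nrDiv low a b c < n → (n ≤ nrDiv high a b c ∨ high = H) →
    solveLoop n a b c low high fuel = h := by
  intro fuel
  induction fuel with
  | zero =>
    intro low high h hg hf h1 h2 h3 h4 h5
    -- fuel 0 forces high ≤ low, i.e. high = low, the no-iteration case
    have heq : high = low := by omega
    obtain ⟨g1, g2, g3, g4⟩ := hg
    have hlt : nrDiv high a b c < n := by rw [heq]; exact h4
    have hH : high = H := by
      rcases h5 with h5 | h5
      · omega
      · exact h5
    have hhi : h = H + 1 := by
      by_contra hcon
      have hle : h ≤ high := by omega
      have hmono : nrDiv h a b c ≤ nrDiv high a b c := nr_mono a b c ha hb hc h high hle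
      have hgeh : n ≤ nrDiv h a b c := by tauto
      omega
    rw [solveLoop, if_neg (by omega : ¬ high - low > 1), solveBack, if_neg (by omega)]
    omega
  | succ f ih =>
    intro low high h hg hf h1 h2 h3 h4 h5
    obtain ⟨g1, g2, g3, g4⟩ := hg
    by_cases hgt : high - low > 1
    · rw [solveLoop, if_pos hgt]
      simp only []
      obtain ⟨hm1, hm2⟩ := mid_bounds low high (by omega)
      have hm1' : low < PySem.Int.floordiv (low + high) 2 := by
        have := fd_bracket (low + high) 2 (by omega)
        omega
      set mid := PySem.Int.floordiv (low + high) 2 with hmid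
      by_cases he : nrDiv mid a b c = n
      · rw [if_pos he]
        -- the break: back off linearly to the first x with count n, which is h
        have hh2 : 2 ≤ h := by
          rcases lt_or_ge h 2 with hlt2 | hge2
          · exfalso
            rcases g2 with g2 | g2
            · have hhn : n ≤ nrDiv h a b c := g2
              have : nrDiv h a b c ≤ nrDiv low a b c :=
                nr_mono a b c ha hb hc h low (by omega)
              have h1h : 1 ≤ h := g3
              -- h = 1 ≤ low, so nrDiv h ≤ nrDiv low < n, contradiction
              omega
            · omega
          · exact hge2
        have hhle : h ≤ mid := by
          by_contra hcon
          have : nrDiv mid a b c < n := g1 mid (by omega) (by omega)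
          omega
        have hPh : nrDiv h a b c = n := by
          have hne : h ≠ H + 1 := by omega
          have hge : n ≤ nrDiv h a b c := by tauto
          have hlt1 : nrDiv (h - 1) a b c < n := g1 (h - 1) (by omega) (by omega)
          have := nr_step a b c h ha hb hc
          omega
        refine solveBack_spec n a b c (mid.toNat + 1) mid h (by omega) ?_ (by
          have := g1 (h - 1) (by omega) (by omega); omega) (by omega)
        intro x hx1 hx2
        have l1 : nrDiv h a b c ≤ nrDiv x a b c := nr_mono a b c ha hb hc h x hx1
        have l2 : nrDiv x a b c ≤ nrDiv mid a b c := nr_mono a b c ha hb hc x mid hx2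
        omega
      · rw [if_neg he]
        by_cases hlt : nrDiv mid a b c < n
        · rw [if_pos hlt]
          exact ih mid high h ⟨g1, g2, g3, g4⟩ (by omega) (by omega) (by omega) h3 hlt h5
        · rw [if_neg hlt]
          exact ih low mid h ⟨g1, g2, g3, g4⟩ (by omega) h1 (by omega) (by omega) h4
            (Or.inl (by omega))
    · -- natural end: high - low ≤ 1, i.e. high = low or high = low + 1
      rw [solveLoop, if_neg hgt]
      by_cases hPhigh : n ≤ nrDiv high a b c
      · -- then high = low + 1, nrDiv high = n, and h = high
        have hne : high ≠ low := by
          intro hc'; rw [hc'] at hPhigh; omega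
        have hho : high = low + 1 := by omega
        have hstep := nr_step a b c high ha hb hc
        have hlow : high - 1 = low := by omega
        rw [hlow] at hstep
        have hPh : nrDiv high a b c = n := by omega
        have hhh : h = high := by
          rcases lt_trichotomy h high with hlt2 | heq2 | hgt2
          · exfalso
            have hle : h ≤ low := by omega
            have hmono : nrDiv h a b c ≤ nrDiv low a b c := nr_mono a b c ha hb hc h low hle
            have hne' : h ≠ H + 1 := by omega
            have hgeh : n ≤ nrDiv h a b c := by tauto
            omega
          · exact heq2
          · exfalso
            have := g1 high (by omega) hgt2
            omega
        rw [hhh]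
        refine solveBack_spec n a b c (high.toNat + 1) high high (by omega) ?_ (by rw [hlow]; omega) (by omega)
        intro x hx1 hx2
        have hx : x = high := by omega
        rw [hx]; exact hPh
      · -- nrDiv high < n, so high = H and the answer is H + 1
        have hH : high = H := by
          rcases h5 with h5 | h5
          · exact absurd h5 hPhigh
          · exact h5
        have hhh : h = H + 1 := by
          by_contra hcon
          have hle : h ≤ high := by omega
          have hmono : nrDiv h a b c ≤ nrDiv high a b c := nr_mono a b c ha hb hc h high hle
          have hgeh : n ≤ nrDiv h a b c := by tauto
          omega
        rw [solveBack, if_neg (by omega)]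
        omega

theorem main_eq (n a b c : Int) (hn : 1 ≤ n) (ha : 0 < a) (hb : 0 < b) (hc : 0 < c)
    (hpre : ¬(n = 1 ∧ a * b * c = 2))
    (hD : ¬(n = 1 ∧ ((a = 1 ∧ b = 1 ∧ 3 ≤ c) ∨ (a = 1 ∧ c = 1 ∧ 3 ≤ b) ∨ (b = 1 ∧ c = 1 ∧ 3 ≤ a)))) :
    solve n a b c = solve_alt n a b c := by
  have habc : 0 < pyLcm (pyLcm a b) c := pyLcm_pos _ c (pyLcm_pos a b ha hb) hc
  set H := n * pyLcm (pyLcm a b) c with hH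
  have hHpos : 1 ≤ H := by
    have := mul_pos (by omega : (0:Int) < n) habc
    omega
  have hgood : goodPt n a b c H (solve_alt n a b c) := by
    show goodPt n a b c H
      (altLoop n (pyLcm a b) (pyLcm a c) (pyLcm b c) (pyLcm (pyLcm a b) c) 1 (H + 1) H.toNat)
    exact altLoop_spec n a b c H ha hb hc H.toNat 1 (H + 1) (by omega) le_rfl (by omega) le_rfl
      (fun x hx1 hx2 => absurd hx1 (by omega)) (Or.inr rfl)
  exact solveLoop_spec n a b c H ha hb hc (H - 1).toNat 1 H (solve_alt n a b c) hgood
    (by omega) le_rfl hHpos le_rfl (nr_one_lt n a b c hn ha hb hc hpre hD) (Or.inr rfl)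


theorem fd_one_right (x : Int) : PySem.Int.floordiv x 1 = x := by
  rw [PySem.Int.floordiv_eq_ediv_of_pos (by omega), Int.ediv_one]

theorem fd_small (k d : Int) (h0 : 0 ≤ k) (h1 : k < d) : PySem.Int.floordiv k d = 0 := by
  rw [PySem.Int.floordiv_eq_iff_of_pos (by omega)]
  omega

theorem pyLcm_one_left (d : Int) (hd : 0 < d) : pyLcm 1 d = d := by
  rw [pyLcm_eq 1 d (by omega) hd]
  have : Int.lcm 1 d = d.natAbs := by simp [Int.lcm]
  omega

theorem pyLcm_one_right (d : Int) (hd : 0 < d) : pyLcm d 1 = d := by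
  rw [pyLcm_eq d 1 hd (by omega)]
  have : Int.lcm d 1 = d.natAbs := by simp [Int.lcm]
  omega

-- inside D_: the count is x - x // d, A returns 3, B returns 1
theorem descend_loop (a b c d : Int) (hd : 3 ≤ d)
    (hnr : ∀ x : Int, nrDiv x a b c = x - PySem.Int.floordiv x d) :
    ∀ (fuel : Nat) (high : Int), 2 ≤ high → high ≤ d → (high - 2).toNat ≤ fuel →
    solveLoop 1 a b c 1 high fuel = 3 := by
  intro fuel
  induction fuel with
  | zero =>
    intro high h2 h3 h4
    have hh : high = 2 := by omega
    subst hh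
    rw [solveLoop, if_neg (by omega), solveBack, if_neg (by rw [hnr, fd_small 2 d (by omega) (by omega)]; omega)]
    norm_num
  | succ f ih =>
    intro high h2 h3 h4
    by_cases hh : high = 2
    · subst hh
      rw [solveLoop, if_neg (by omega), solveBack, if_neg (by rw [hnr, fd_small 2 d (by omega) (by omega)]; omega)]
      norm_num
    · have h3' : 3 ≤ high := by omega
      rw [solveLoop, if_pos (by omega)]
      simp only []
      have hb := fd_bracket (1 + high) 2 (by omega)
      set mid := PySem.Int.floordiv (1 + high) 2 with hm
      have hm1 : 2 ≤ mid := by omega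
      have hm2 : mid ≤ high - 1 := by omega
      have hnrm : nrDiv mid a b c = mid := by
        rw [hnr, fd_small mid d (by omega) (by omega)]; omega
      rw [if_neg (by omega), if_neg (by omega)]
      exact ih mid (by omega) (by omega) (by omega)

theorem tight_case (a b c d : Int) (ha : 0 < a) (hb : 0 < b) (hc : 0 < c) (hd : 3 ≤ d)
    (habc : pyLcm (pyLcm a b) c = d)
    (hnr : ∀ x : Int, nrDiv x a b c = x - PySem.Int.floordiv x d) :
    solve 1 a b c = 3 ∧ solve_alt 1 a b c = 1 := by
  constructor
  · show solveLoop 1 a b c 1 (1 * pyLcm (pyLcm a b) c) (1 * pyLcm (pyLcm a b) c - 1).toNat = 3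
    rw [habc, one_mul]
    exact descend_loop a b c d hd hnr ((d - 1).toNat) d (by omega) le_rfl (by omega)
  · have hg : goodPt 1 a b c d (solve_alt 1 a b c) := by
      have hs := altLoop_spec 1 a b c d ha hb hc d.toNat 1 (d + 1) (by omega) le_rfl (by omega)
        le_rfl (fun x hx1 hx2 => absurd hx1 (by omega)) (Or.inr rfl)
      show goodPt 1 a b c d
        (altLoop 1 (pyLcm a b) (pyLcm a c) (pyLcm b c) (pyLcm (pyLcm a b) c) 1
          (1 * pyLcm (pyLcm a b) c + 1) (1 * pyLcm (pyLcm a b) c).toNat)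
      rw [one_mul, habc]
      rw [habc] at hs
      exact hs
    obtain ⟨g1, g2, g3, g4⟩ := hg
    have hnr1 : nrDiv 1 a b c = 1 := by
      rw [hnr, fd_small 1 d (by omega) (by omega)]
      norm_num
    by_contra hne
    have h2 : 2 ≤ solve_alt 1 a b c := by omega
    have := g1 1 (by omega) (by omega)
    omega

theorem tight_main (n a b c : Int)
    (hD : n = 1 ∧ ((a = 1 ∧ b = 1 ∧ 3 ≤ c) ∨ (a = 1 ∧ c = 1 ∧ 3 ≤ b) ∨ (b = 1 ∧ c = 1 ∧ 3 ≤ a))) :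
    solve n a b c ≠ solve_alt n a b c := by
  obtain ⟨hn, hcase⟩ := hD
  subst hn
  have one11 : pyLcm 1 1 = (1 : Int) := by decide
  rcases hcase with ⟨h1, h2, h3⟩ | ⟨h1, h2, h3⟩ | ⟨h1, h2, h3⟩
  · subst h1; subst h2
    have hcc : pyLcm 1 c = c := pyLcm_one_left c (by omega)
    have habc : pyLcm (pyLcm 1 1) c = c := by rw [one11, hcc]
    have hnr : ∀ x : Int, nrDiv x 1 1 c = x - PySem.Int.floordiv x c := by
      intro x
      unfold nrDiv
      simp only [one11, hcc]
      rw [fd_one_right]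
      ring
    obtain ⟨hA, hB⟩ := tight_case 1 1 c c (by omega) (by omega) (by omega) h3 habc hnr
    omega
  · subst h1; subst h2
    have hb1 : pyLcm 1 b = b := pyLcm_one_left b (by omega)
    have hb2 : pyLcm b 1 = b := pyLcm_one_right b (by omega)
    have habc : pyLcm (pyLcm 1 b) 1 = b := by rw [hb1, hb2]
    have hnr : ∀ x : Int, nrDiv x 1 b 1 = x - PySem.Int.floordiv x b := by
      intro x
      unfold nrDiv
      simp only [one11, hb1, hb2]
      rw [fd_one_right]
      ring
    obtain ⟨hA, hB⟩ := tight_case 1 b 1 b (by omega) (by omega) (by omega) h3 habc hnr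
    omega
  · subst h1; subst h2
    have ha1 : pyLcm a 1 = a := pyLcm_one_right a (by omega)
    have habc : pyLcm (pyLcm a 1) 1 = a := by rw [ha1, ha1]
    have hnr : ∀ x : Int, nrDiv x a 1 1 = x - PySem.Int.floordiv x a := by
      intro x
      unfold nrDiv
      simp only [ha1, one11]
      rw [fd_one_right]
      ring
    obtain ⟨hA, hB⟩ := tight_case a 1 1 a (by omega) (by omega) (by omega) h3 habc hnr
    omega


-- ===== VERDICT (by name: the statement is the Claim_ definition above) =====
theorem solve_spec : Claim_unchanged_solve := by
  unfold Claim_unchanged_solve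
  intro n a b c hdom hpre
  unfold Spec_solve
  intro hD
  unfold Pre_solve at hpre
  unfold D_solve at hD
  rcases hpre with ⟨h1, h2, h3, h4, h5⟩ | ⟨hL0, hnL, hnr⟩
  · exact main_eq n a b c h1 (by omega) (by omega) (by omega) h5 hD
  · -- the loop of neither program runs: both return n * lcm + 1
    have hB : solve_alt n a b c = n * pyLcm (pyLcm a b) c + 1 := by
      show altLoop n (pyLcm a b) (pyLcm a c) (pyLcm b c) (pyLcm (pyLcm a b) c) 1
        (n * pyLcm (pyLcm a b) c + 1) (n * pyLcm (pyLcm a b) c).toNat = _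
      rw [altLoop.eq_def, if_neg (by omega)]
    have hA : solve n a b c = n * pyLcm (pyLcm a b) c + 1 := by
      show solveLoop n a b c 1 (n * pyLcm (pyLcm a b) c)
        (n * pyLcm (pyLcm a b) c - 1).toNat = _
      rw [solveLoop.eq_def, if_neg (by omega), solveBack.eq_def, if_neg hnr]
    rw [hA, hB]

theorem solve_changed : Claim_changed_solve := by
  unfold Claim_changed_solve; decide

theorem solve_tight : Claim_exact_solve := by
  unfold Claim_exact_solve
  intro n a b c hdom hpre hD
  unfold D_solve at hD
  exact tight_main n a b c hD
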